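-- pv_equiv track=rewrite | github.com/arindamroy868/DSA_Combined | String/Check_String_Is_Shuffle_Of_Other_Two_Strings/checkStringShuffle.py | shuffleCheck2
-- ===== SOURCE A (Python) =====
-- def shuffleCheck2(first, second, result):
--     if len(first) + len(second) != len(result):
--         return False
--
--     map1 = {}
--     map2 = {}
--     for i in first+second:
--         if map1.get(i) is not None:
--             map1[i] += 1
--         else:
--             map1[i] = 1
--
--
--     for j in result:
--         if map2.get(j) is not None:
--             map2[j] += 1
--         else:
--             map2[j] = 1
--
--     for key, value in map2.items():
--         if map1.get(key) is None or map1[key] != value: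
--             return False
--
--     return True
-- ===== SOURCE B (Python) =====
-- def shuffleCheck2(first, second, result):
--     return sorted(first + second) == sorted(result)
-- ===== Notes on version B (the rewrite author's own statement) =====
-- stated objective: simpler
-- what changed: Replaces the two hand-built frequency dictionaries, the length check and the key-walk with a single multiset comparison: sorted(first+second) == sorted(result).
import Mathlib
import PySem

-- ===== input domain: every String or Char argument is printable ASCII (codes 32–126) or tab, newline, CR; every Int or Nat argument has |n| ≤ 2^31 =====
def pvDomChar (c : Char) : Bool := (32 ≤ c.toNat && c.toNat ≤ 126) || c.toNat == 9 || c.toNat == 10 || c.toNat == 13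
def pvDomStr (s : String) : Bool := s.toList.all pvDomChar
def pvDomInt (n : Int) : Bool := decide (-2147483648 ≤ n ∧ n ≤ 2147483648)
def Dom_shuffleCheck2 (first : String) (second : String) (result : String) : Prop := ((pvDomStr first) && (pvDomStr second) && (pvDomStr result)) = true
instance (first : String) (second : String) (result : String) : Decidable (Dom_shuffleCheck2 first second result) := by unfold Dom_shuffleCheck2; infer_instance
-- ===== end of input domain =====

-- B replaces the two frequency dictionaries and the key-walk with one sorted-multiset comparison (simpler, not faster).

-- ===== PORT A =====
-- the get-then-increment-or-initialize counting loop of A, verbatim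
def pvCountStep (d : PySem.Dict Char Int) (c : Char) : PySem.Dict Char Int :=
  match d.get? c with
  | some v => d.insert c (v + 1)
  | none => d.insert c 1

def shuffleCheck2 (first : String) (second : String) (result : String) : Bool :=
  if PySem.Str.len first + PySem.Str.len second ≠ PySem.Str.len result then false
  else
    let map1 := (first ++ second).toList.foldl pvCountStep PySem.Dict.empty
    let map2 := result.toList.foldl pvCountStep PySem.Dict.empty
    map2.items.all (fun kv =>
      match map1.get? kv.1 with
      | none => false
      | some w => w == kv.2)

-- ===== PORT B =====
def shuffleCheck2_alt (first : String) (second : String) (result : String) : Bool :=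
  PySem.List.sorted (first ++ second).toList (fun x => x) false
    == PySem.List.sorted result.toList (fun x => x) false

-- ===== PRECONDITION & SPEC =====
def Spec_shuffleCheck2 (first : String) (second : String) (result : String) (out : Bool) : Prop := out = shuffleCheck2_alt first second result
instance (first : String) (second : String) (result : String) (out : Bool) : Decidable (Spec_shuffleCheck2 first second result out) := by unfold Spec_shuffleCheck2; infer_instance

-- ===== CLAIM (what is proved, stated in full; the proofs are below) =====
def Claim_equal_shuffleCheck2 : Prop := ∀ (first : String) (second : String) (result : String), Dom_shuffleCheck2 first second result → Spec_shuffleCheck2 first second result (shuffleCheck2 first second result)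

-- ===== LEMMAS AND PROOFS =====

-- A's counting step is the standard insert-with-getD step
theorem pvCountStep_eq (d : PySem.Dict Char Int) (c : Char) :
    pvCountStep d c = d.insert c (d.getD c 0 + 1) := by
  unfold pvCountStep
  cases h : d.get? c <;>
    simp [PySem.Dict.getD_eq_get?_getD, h]

theorem pvCountFold_eq (l : List Char) :
    l.foldl pvCountStep PySem.Dict.empty = PySem.Dict.counter l := by
  rw [← PySem.Dict.foldl_insert_getD_add_one_eq_counter]
  exact PySem.List.foldl_congr_mem _ _ _ _ (fun d c _ => pvCountStep_eq d c)

-- the whole of A, as a proposition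
theorem shuffleCheck2_true_iff (first second result : String) :
    shuffleCheck2 first second result = true ↔
      ((first ++ second).toList.length = result.toList.length ∧
        ∀ k ∈ result.toList, (first ++ second).toList.count k = result.toList.count k) := by
  unfold shuffleCheck2
  set l1 := (first ++ second).toList with hl1
  set l2 := result.toList with hl2
  have hlen1 : PySem.Str.len first + PySem.Str.len second = (l1.length : Int) := by
    simp [PySem.Str.len, hl1]
  have hlen2 : PySem.Str.len result = (l2.length : Int) := by simp [PySem.Str.len, hl2]
  rw [hlen1, hlen2, pvCountFold_eq, pvCountFold_eq]
  split_ifs with hne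
  · simp only [false_iff, not_and]
    intro hlen
    exfalso; exact hne (by exact_mod_cast hlen)
  · have hlen : l1.length = l2.length := by exact_mod_cast not_ne_iff.mp hne
    simp only [hlen, true_and, List.all_eq_true]
    constructor
    · intro h k hk
      have hmem : (k, (l2.count k : Int)) ∈ (PySem.Dict.counter l2).items := by
        rw [PySem.Dict.items_counter]
        exact List.mem_map.mpr ⟨k, (PySem.Set.mem_ofList _ _).mpr hk, rfl⟩
      have := h _ hmem
      cases hg : (PySem.Dict.counter l1).get? k with
      | none => simp [hg] at this
      | some w =>
        simp only [hg, beq_iff_eq] at this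
        have : (PySem.Dict.counter l1).getD k 0 = (l2.count k : Int) := by
          rw [PySem.Dict.getD_eq_get?_getD, hg]; simpa using this
        rw [PySem.Dict.getD_counter] at this
        exact_mod_cast this
    · intro h kv hkv
      rw [PySem.Dict.items_counter] at hkv
      obtain ⟨k, hk, rfl⟩ := List.mem_map.mp hkv
      have hk2 : k ∈ l2 := (PySem.Set.mem_ofList _ _).mp hk
      have hcount := h k hk2
      have hk1 : k ∈ l1 := by
        rw [← List.count_pos_iff, hcount, List.count_pos_iff]; exact hk2
      have hget : (PySem.Dict.counter l1).get? k = some ((l1.count k : Int)) := by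
        have hc : (PySem.Dict.counter l1).contains k = true := by
          rw [PySem.Dict.contains_iff_mem_keys, PySem.Dict.keys_counter]
          exact (PySem.Set.mem_ofList _ _).mpr hk1
        cases hg : (PySem.Dict.counter l1).get? k with
        | none =>
          rw [PySem.Dict.get?_eq_none_iff_contains] at hg
          simp [hg] at hc
        | some w =>
          have : (PySem.Dict.counter l1).getD k 0 = w := by
            rw [PySem.Dict.getD_eq_get?_getD, hg]; rfl
          rw [PySem.Dict.getD_counter] at this
          exact congrArg some this.symm
      simp [hget, hcount]

-- counts of B's side agree with a permutation
theorem perm_of_len_count (l1 l2 : List Char)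
    (hlen : l1.length = l2.length)
    (hcnt : ∀ k ∈ l2, l1.count k = l2.count k) : l1.Perm l2 := by
  have hsub : l2.Subperm l1 := by
    rw [List.subperm_ext_iff]
    intro x hx
    exact le_of_eq (hcnt x hx).symm
  exact (hsub.perm_of_length_le (le_of_eq hlen)).symm

-- ===== VERDICT (by name: the statement is the Claim_ definition above) =====
theorem shuffleCheck2_spec : Claim_equal_shuffleCheck2 := by
  intro first second result _
  unfold Spec_shuffleCheck2 shuffleCheck2_alt
  have hb : (PySem.List.sorted (first ++ second).toList (fun x => x) false
      == PySem.List.sorted result.toList (fun x => x) false) = true ↔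
      (first ++ second).toList.Perm result.toList := by
    rw [beq_iff_eq]
    exact PySem.List.sorted_id_eq_sorted_id_iff_perm _ _
  have ha := shuffleCheck2_true_iff first second result
  cases hA : shuffleCheck2 first second result with
  | true =>
    obtain ⟨hlen, hcnt⟩ := ha.mp hA
    exact (hb.mpr (perm_of_len_count _ _ hlen hcnt)).symm
  | false =>
    cases hB : (PySem.List.sorted (first ++ second).toList (fun x => x) false
        == PySem.List.sorted result.toList (fun x => x) false) with
    | false => rfl
    | true =>
      have hperm := hb.mp hB
      have : shuffleCheck2 first second result = true :=
        ha.mpr ⟨hperm.length_eq, fun k _ => hperm.count_eq k⟩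
      rw [hA] at this; exact absurd this (by simp)
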